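-- pv_equiv track=rewrite | github.com/raeez/chiral-bar-cobar | compute/lib/theorem_bcd_w_duality_engine.py | _is_valid_bcd_partition
-- ===== SOURCE A (Python) =====
-- from collections import Counter
-- from typing import Any, Dict, List, Optional, Tuple
--
-- def _is_valid_bcd_partition(lie_type: str, partition: Tuple[int, ...]) -> bool:
--     """Check if a partition parameterizes a nilpotent orbit.
--
--     Type B_n (so_{2n+1}): partition of 2n+1, even parts have even multiplicity.
--     Type C_n (sp_{2n}):   partition of 2n, odd parts have even multiplicity.
--     Type D_n (so_{2n}):   partition of 2n, even parts have even multiplicity.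
--     """
--     parts = tuple(sorted(partition, reverse=True))
--     n_total = sum(parts)
--
--     # Count multiplicities
--     mult = Counter(parts)
--
--     if lie_type == 'B':
--         # Even parts must have even multiplicity
--         return all(mult[p] % 2 == 0 for p in mult if p % 2 == 0)
--     elif lie_type == 'C':
--         # Odd parts must have even multiplicity
--         return all(mult[p] % 2 == 0 for p in mult if p % 2 == 1)
--     elif lie_type == 'D':
--         # Even parts must have even multiplicity
--         return all(mult[p] % 2 == 0 for p in mult if p % 2 == 0)
--     return False
-- ===== SOURCE B (Python) =====
-- def _is_valid_bcd_partition(lie_type, partition):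
--     """Sort-and-pair scan: in the ascending sort equal parts sit in runs, so
--     pairing adjacent equal elements consumes multiplicities two at a time;
--     any element left unpaired has odd multiplicity and must avoid the
--     forbidden parity for the Lie type."""
--     if lie_type == 'B' or lie_type == 'D':
--         bad = 0  # even parts must have even multiplicity
--     elif lie_type == 'C':
--         bad = 1  # odd parts must have even multiplicity
--     else:
--         return False
--     xs = sorted(partition)
--     i = 0
--     n = len(xs)
--     while i < n:
--         if i + 1 < n and xs[i + 1] == xs[i]:
--             i += 2  # paired off two equal copies
--         else:
--             if xs[i] % 2 == bad:
--                 return False  # odd-multiplicity part of the forbidden parity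
--             i += 1
--     return True
-- ===== Notes on version B (the rewrite author's own statement) =====
-- stated objective: alternative
-- what changed: Replaced the Counter-of-multiplicities with a sort-and-pair scan: equal parts are adjacent after sorting, so a single index walk pairs equal neighbours two at a time and an unpaired survivor (odd multiplicity) is immediately checked against the forbidden parity, with early exit; no hash table of multiplicities is built.
import Mathlib
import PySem

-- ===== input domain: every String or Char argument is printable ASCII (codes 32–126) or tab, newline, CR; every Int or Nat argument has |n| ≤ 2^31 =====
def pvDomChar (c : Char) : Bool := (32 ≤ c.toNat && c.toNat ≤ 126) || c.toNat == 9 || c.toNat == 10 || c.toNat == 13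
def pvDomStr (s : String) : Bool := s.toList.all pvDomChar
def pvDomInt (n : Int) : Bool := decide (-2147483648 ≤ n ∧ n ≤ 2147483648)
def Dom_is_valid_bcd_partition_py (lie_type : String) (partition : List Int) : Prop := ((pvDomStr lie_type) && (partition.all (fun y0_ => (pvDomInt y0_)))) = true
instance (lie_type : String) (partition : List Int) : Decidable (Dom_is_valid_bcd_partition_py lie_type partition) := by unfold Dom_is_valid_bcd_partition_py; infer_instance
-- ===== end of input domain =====

-- B replaces the Counter of multiplicities by a sort-and-pair scan: after an ascending sort,
-- equal parts are adjacent, so one index walk pairs equal neighbours two at a time and any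
-- unpaired survivor (a part of odd multiplicity) is checked against the forbidden parity
-- (alternative algorithm; return values proved equal on all inputs).

-- ===== PORT A =====
def is_valid_bcd_partition_py (lie_type : String) (partition : List Int) : Bool :=
  let parts := PySem.List.sorted partition (fun x => x) true
  let _n_total := parts.sum
  let mult := PySem.Dict.counter parts
  if lie_type == "B" then
    ((mult.keys.filter (fun p => PySem.Int.mod p 2 == 0)).all
      (fun p => PySem.Int.mod (mult.getD p 0) 2 == 0))
  else if lie_type == "C" then
    ((mult.keys.filter (fun p => PySem.Int.mod p 2 == 1)).all
      (fun p => PySem.Int.mod (mult.getD p 0) 2 == 0))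
  else if lie_type == "D" then
    ((mult.keys.filter (fun p => PySem.Int.mod p 2 == 0)).all
      (fun p => PySem.Int.mod (mult.getD p 0) 2 == 0))
  else false

-- ===== PORT B =====
-- the while-loop of Source B: walk the sorted list, pairing adjacent equal elements;
-- an unpaired element must not have the forbidden parity `bad`
def pairScan (bad : Int) : List Int → Bool
  | [] => true
  | [x] => ! (PySem.Int.mod x 2 == bad)
  | x :: y :: rest =>
    if y == x then pairScan bad rest
    else if PySem.Int.mod x 2 == bad then false
    else pairScan bad (y :: rest)

def is_valid_bcd_partition_py_alt (lie_type : String) (partition : List Int) : Bool :=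
  if lie_type == "B" || lie_type == "D" then
    pairScan 0 (PySem.List.sorted partition (fun x => x) false)
  else if lie_type == "C" then
    pairScan 1 (PySem.List.sorted partition (fun x => x) false)
  else false

-- ===== PRECONDITION & SPEC =====
def Spec_is_valid_bcd_partition_py (lie_type : String) (partition : List Int) (out : Bool) : Prop := out = is_valid_bcd_partition_py_alt lie_type partition
instance (lie_type : String) (partition : List Int) (out : Bool) : Decidable (Spec_is_valid_bcd_partition_py lie_type partition out) := by unfold Spec_is_valid_bcd_partition_py; infer_instance

-- ===== CLAIM =====
def Claim_equal_is_valid_bcd_partition_py : Prop := ∀ (lie_type : String) (partition : List Int), Dom_is_valid_bcd_partition_py lie_type partition → Spec_is_valid_bcd_partition_py lie_type partition (is_valid_bcd_partition_py lie_type partition)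

-- ===== LEMMAS AND PROOFS =====

theorem mod2_int (p : Int) : PySem.Int.mod p 2 = p % 2 :=
  PySem.Int.mod_eq_emod_of_pos (by norm_num)

-- on an ascending list, the pair scan accepts iff every value of odd multiplicity
-- avoids the forbidden parity
theorem pairScan_eq (bad : Int) (xs : List Int) (h : xs.Pairwise (· ≤ ·)) :
    pairScan bad xs = true ↔ ∀ v : Int, ¬ (xs.count v % 2 = 0) → ¬ (v % 2 = bad) := by
  induction xs using pairScan.induct bad with
  | case1 => simp [pairScan]
  | case2 x =>
    simp only [pairScan, Bool.not_eq_eq_eq_not, Bool.not_true, beq_eq_false_iff_ne, ne_eq,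
      mod2_int, List.count_cons, List.count_nil]
    constructor
    · intro hx v hv
      have : v = x := by
        by_contra hne
        simp [(Ne.symm hne : x ≠ v)] at hv
      subst this; exact hx
    · intro hall
      exact hall x (by simp)
  | case3 x y rest hyx ih =>
    have hx : y = x := by simpa using hyx
    subst hx
    have htail : rest.Pairwise (· ≤ ·) := (List.pairwise_cons.mp (List.pairwise_cons.mp h).2).2
    simp only [pairScan]
    rw [if_pos hyx, ih htail]
    have hcnt : ∀ v : Int, (y :: y :: rest).count v % 2 = rest.count v % 2 := by
      intro v; simp only [List.count_cons]; split_ifs <;> omega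
    constructor
    · intro hall v hv; exact hall v (by have := hcnt v; omega)
    · intro hall v hv; exact hall v (by have := hcnt v; omega)
  | case4 x y rest hyx hbad =>
    have hne : ¬ y = x := by simpa using hyx
    have hpair := List.pairwise_cons.mp h
    have htail : (y :: rest).Pairwise (· ≤ ·) := hpair.2
    have hxle : ∀ z ∈ y :: rest, x ≤ z := hpair.1
    have hxy : x < y := lt_of_le_of_ne (hxle y (by simp)) (fun hh => hne hh.symm)
    have hxnot : x ∉ y :: rest := by
      intro hmem
      rcases List.mem_cons.mp hmem with h1 | h2
      · exact hne h1.symm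
      · have : y ≤ x := (List.pairwise_cons.mp htail).1 x h2
        omega
    have hcx : (x :: y :: rest).count x = 1 := by
      simp [List.count_eq_zero.mpr hxnot]
    have hbad' : x % 2 = bad := by
      have := of_decide_eq_true (by simpa [beq_iff_eq, mod2_int] using hbad)
      exact this
    simp only [pairScan]
    rw [if_neg hyx, if_pos hbad]
    simp only [Bool.false_eq_true, false_iff, not_forall]
    refine ⟨x, ?_, by simp [hbad']⟩
    rw [hcx]; omega
  | case5 x y rest hyx hbad ih =>
    have hne : ¬ y = x := by simpa using hyx
    have hpair := List.pairwise_cons.mp h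
    have htail : (y :: rest).Pairwise (· ≤ ·) := hpair.2
    have hxle : ∀ z ∈ y :: rest, x ≤ z := hpair.1
    have hxnot : x ∉ y :: rest := by
      intro hmem
      rcases List.mem_cons.mp hmem with h1 | h2
      · exact hne h1.symm
      · have hyz : y ≤ x := (List.pairwise_cons.mp htail).1 x h2
        have hxy : x < y := lt_of_le_of_ne (hxle y (by simp)) (fun hh => hne hh.symm)
        omega
    have hbad' : ¬ x % 2 = bad := by
      intro hh
      exact absurd (by simpa [beq_iff_eq, mod2_int] using hh) (by simpa using hbad)
    simp only [pairScan]
    rw [if_neg hyx, if_neg hbad, ih htail]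
    constructor
    · intro hall v hv
      by_cases hvx : v = x
      · subst hvx; exact hbad'
      · apply hall v
        have h1 : (x :: y :: rest).count v = (y :: rest).count v := by
          simp [List.count_cons, (show ¬ x = v from fun hh => hvx hh.symm)]
        rw [h1] at hv; exact hv
    · intro hall v hv
      have hvx : ¬ v = x := by
        intro hh; subst hh
        simp [List.count_eq_zero.mpr hxnot] at hv
      apply hall v
      have h1 : (x :: y :: rest).count v = (y :: rest).count v := by
        simp [List.count_cons, (show ¬ x = v from fun hh => hvx hh.symm)]
      rw [h1]; exact hv

-- A's Counter check for forbidden parity `bad` equals B's pair scan on the ascending sort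
theorem A_eq_scan (bad : Int) (partition : List Int) :
    (((PySem.Dict.counter (PySem.List.sorted partition (fun x => x) true)).keys.filter
        (fun p => PySem.Int.mod p 2 == bad)).all
      (fun p => PySem.Int.mod
        ((PySem.Dict.counter (PySem.List.sorted partition (fun x => x) true)).getD p 0) 2 == 0))
    = pairScan bad (PySem.List.sorted partition (fun x => x) false) := by
  rw [Bool.eq_iff_iff,
    pairScan_eq bad _ (by simpa using PySem.List.sorted_pairwise partition (fun x => x))]
  have hcnt : ∀ v : Int, (PySem.List.sorted partition (fun x => x) true).count v
      = partition.count v := fun v => (PySem.List.sorted_perm partition _ true).count_eq v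
  have hcnt' : ∀ v : Int, (PySem.List.sorted partition (fun x => x) false).count v
      = partition.count v := fun v => (PySem.List.sorted_perm partition _ false).count_eq v
  simp only [List.all_eq_true, List.mem_filter, PySem.Dict.keys_counter,
    PySem.Set.mem_ofList, PySem.List.mem_sorted, PySem.Dict.getD_counter, hcnt, hcnt',
    mod2_int, beq_iff_eq]
  constructor
  · intro h v hv hp
    have hvmem : v ∈ partition := List.count_pos_iff.mp (by omega)
    have := h v ⟨hvmem, hp⟩
    have hc0 : partition.count v % 2 = 0 := by exact_mod_cast this
    omega
  · intro h p hp
    by_cases hc : partition.count p % 2 = 0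
    · exact_mod_cast congrArg (Nat.cast : Nat → Int) hc
    · exact absurd hp.2 (h p hc)

-- ===== VERDICT =====
theorem is_valid_bcd_partition_py_spec : Claim_equal_is_valid_bcd_partition_py := by
  intro lie_type partition _
  show is_valid_bcd_partition_py lie_type partition = is_valid_bcd_partition_py_alt lie_type partition
  by_cases hB : lie_type = "B"
  · subst hB; exact A_eq_scan 0 partition
  by_cases hC : lie_type = "C"
  · subst hC; exact A_eq_scan 1 partition
  by_cases hD : lie_type = "D"
  · subst hD; exact A_eq_scan 0 partition
  have e1 : (lie_type == "B") = false := beq_eq_false_iff_ne.mpr hB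
  have e2 : (lie_type == "C") = false := beq_eq_false_iff_ne.mpr hC
  have e3 : (lie_type == "D") = false := beq_eq_false_iff_ne.mpr hD
  simp [is_valid_bcd_partition_py, is_valid_bcd_partition_py_alt, e1, e2, e3]
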